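-- pv_equiv track=rewrite | github.com/RATHOD-SHUBHAM/DataStructure-And-Algorithm | Striver/Arrays/Easy/Union of Two Sorted Arrays/sol.py | findUnion
-- ===== SOURCE A (Python) =====
-- def findUnion(arr1,arr2,n,m):
--     '''
--     :param a: given sorted array a
--     :param n: size of sorted array a
--     :param b: given sorted array b
--     :param m: size of sorted array b
--     :return:  The union of both arrays as a list
--     '''
--     union_set = set()
--
--     _n = max(m,n)
--
--     for i in range(_n):
--         if i < n:
--             union_set.add(arr1[i])
--         if i < m:
--             union_set.add(arr2[i])
--
--     return sorted(list(union_set))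
-- ===== SOURCE B (Python) =====
-- def findUnion(arr1, arr2, n, m):
--     merged = sorted([arr1[i] for i in range(n)] + [arr2[j] for j in range(m)])
--     out = []
--     for x in merged:
--         if not out or out[-1] != x:
--             out.append(x)
--     return out
-- ===== Notes on version B (the rewrite author's own statement) =====
-- stated objective: alternative
-- what changed: Replaces the hash-set accumulation over range(max(n,m)) followed by sorting the set with: concatenate the two prefixes, sort once (with duplicates), then one linear pass dropping adjacent duplicates.
import Mathlib
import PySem

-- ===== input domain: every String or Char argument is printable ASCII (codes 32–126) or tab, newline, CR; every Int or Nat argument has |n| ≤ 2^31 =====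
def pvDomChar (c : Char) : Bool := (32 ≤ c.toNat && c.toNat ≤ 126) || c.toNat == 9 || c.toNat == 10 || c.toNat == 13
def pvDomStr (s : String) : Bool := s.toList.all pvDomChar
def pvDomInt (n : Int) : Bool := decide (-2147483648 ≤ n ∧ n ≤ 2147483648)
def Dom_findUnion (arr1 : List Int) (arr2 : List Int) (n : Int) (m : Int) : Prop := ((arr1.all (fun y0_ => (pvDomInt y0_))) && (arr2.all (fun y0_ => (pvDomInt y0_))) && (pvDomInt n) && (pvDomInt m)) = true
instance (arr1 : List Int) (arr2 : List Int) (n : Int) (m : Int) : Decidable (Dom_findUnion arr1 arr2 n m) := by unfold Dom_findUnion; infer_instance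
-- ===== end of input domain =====

-- B replaces A's hash-set accumulation + sort by: take the two prefixes, sort once with
-- duplicates, then one linear pass dropping adjacent duplicates (objective: alternative).

-- ===== PORT A =====
def findUnion (arr1 : List Int) (arr2 : List Int) (n : Int) (m : Int) : List Int :=
  let N := max m n
  let unionSet : PySem.Set Int :=
    (PySem.List.pyRange 0 N 1).foldl (fun s i =>
      let s1 := if i < n then
          match PySem.List.pyGet? arr1 i with
          | some v => PySem.Set.add s v
          | none => s       -- IndexError: excluded by Pre_findUnion
        else s
      if i < m then
        match PySem.List.pyGet? arr2 i with
        | some v => PySem.Set.add s1 v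
        | none => s1        -- IndexError: excluded by Pre_findUnion
      else s1) PySem.Set.empty
  PySem.List.sorted unionSet (fun x => x) false

-- ===== PORT B =====
-- the comprehension [arr1[i] for i in range(n)] is filterMap of pyGet?: exact under
-- Pre_findUnion, where every accessed index is in range (none = IndexError never occurs)
def findUnion_alt (arr1 : List Int) (arr2 : List Int) (n : Int) (m : Int) : List Int :=
  let merged := PySem.List.sorted
    ((PySem.List.pyRange 0 n 1).filterMap (fun i => PySem.List.pyGet? arr1 i) ++
     (PySem.List.pyRange 0 m 1).filterMap (fun j => PySem.List.pyGet? arr2 j))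
    (fun x => x) false
  merged.foldl (fun out x =>
    if out.isEmpty || !(PySem.List.pyGet? out (-1) == some x) then out ++ [x] else out) []

-- ===== PRECONDITION & SPEC =====
-- Pre_ excludes exactly the inputs where Python A raises IndexError: a declared size
-- larger than the corresponding list's length.
def Pre_findUnion (arr1 : List Int) (arr2 : List Int) (n : Int) (m : Int) : Prop :=
  n ≤ (arr1.length : Int) ∧ m ≤ (arr2.length : Int)
instance (arr1 : List Int) (arr2 : List Int) (n : Int) (m : Int) : Decidable (Pre_findUnion arr1 arr2 n m) := by unfold Pre_findUnion; infer_instance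
def pvWitness_findUnion : List Int × List Int × Int × Int := ([1, 2, 3], [2, 2, 4], 3, 3)

def Spec_findUnion (arr1 : List Int) (arr2 : List Int) (n : Int) (m : Int) (out : List Int) : Prop := out = findUnion_alt arr1 arr2 n m
instance (arr1 : List Int) (arr2 : List Int) (n : Int) (m : Int) (out : List Int) : Decidable (Spec_findUnion arr1 arr2 n m out) := by unfold Spec_findUnion; infer_instance

-- ===== CLAIM (what is proved, stated in full; the proofs are below) =====
def Claim_equal_findUnion : Prop := ∀ (arr1 : List Int) (arr2 : List Int) (n : Int) (m : Int), Dom_findUnion arr1 arr2 n m → Pre_findUnion arr1 arr2 n m → Spec_findUnion arr1 arr2 n m (findUnion arr1 arr2 n m)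

-- ===== LEMMAS AND PROOFS =====

-- A's loop body, named for the proofs
def stepA (arr1 arr2 : List Int) (n m : Int) (s : PySem.Set Int) (i : Int) : PySem.Set Int :=
  let s1 := if i < n then
      match PySem.List.pyGet? arr1 i with
      | some v => PySem.Set.add s v
      | none => s
    else s
  if i < m then
    match PySem.List.pyGet? arr2 i with
    | some v => PySem.Set.add s1 v
    | none => s1
  else s1

lemma findUnion_eq (arr1 arr2 : List Int) (n m : Int) :
    findUnion arr1 arr2 n m =
      PySem.List.sorted ((PySem.List.pyRange 0 (max m n) 1).foldl (stepA arr1 arr2 n m) PySem.Set.empty)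
        (fun x => x) false := rfl

lemma mem_stepA (arr1 arr2 : List Int) (n m : Int) (s : PySem.Set Int) (j x : Int) :
    x ∈ stepA arr1 arr2 n m s j ↔
      x ∈ s ∨ (j < n ∧ PySem.List.pyGet? arr1 j = some x)
            ∨ (j < m ∧ PySem.List.pyGet? arr2 j = some x) := by
  unfold stepA
  split_ifs with h1 h2 h2 <;>
    rcases hg1 : PySem.List.pyGet? arr1 j with _ | v1 <;>
    rcases hg2 : PySem.List.pyGet? arr2 j with _ | v2 <;>
    simp [PySem.Set.mem_add, h1, h2] <;>
    constructor <;> intro h <;> rcases h with h | h <;>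
    simp_all [eq_comm] <;> tauto

lemma nodup_stepA (arr1 arr2 : List Int) (n m : Int) (s : PySem.Set Int) (j : Int)
    (hs : s.Nodup) : (stepA arr1 arr2 n m s j).Nodup := by
  unfold stepA
  split_ifs <;>
    rcases PySem.List.pyGet? arr1 j with _ | v1 <;>
    rcases PySem.List.pyGet? arr2 j with _ | v2 <;>
    simp only [] <;>
    first
      | exact hs
      | exact PySem.Set.nodup_add _ _ hs
      | exact PySem.Set.nodup_add _ _ (PySem.Set.nodup_add _ _ hs)

lemma mem_foldA (arr1 arr2 : List Int) (n m : Int) :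
    ∀ (is : List Int) (s : PySem.Set Int) (x : Int),
      x ∈ is.foldl (stepA arr1 arr2 n m) s ↔
        x ∈ s ∨ (∃ i ∈ is, i < n ∧ PySem.List.pyGet? arr1 i = some x)
              ∨ (∃ i ∈ is, i < m ∧ PySem.List.pyGet? arr2 i = some x) := by
  intro is
  induction is with
  | nil => intro s x; simp
  | cons j js ih =>
    intro s x
    rw [List.foldl_cons, ih, mem_stepA]
    simp only [List.exists_mem_cons_iff]
    aesop

lemma nodup_foldA (arr1 arr2 : List Int) (n m : Int) :
    ∀ (is : List Int) (s : PySem.Set Int), s.Nodup → (is.foldl (stepA arr1 arr2 n m) s).Nodup := by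
  intro is
  induction is with
  | nil => intro s hs; simpa
  | cons j js ih =>
    intro s hs
    exact ih _ (nodup_stepA arr1 arr2 n m s j hs)

-- B's dedup loop body, named for the proofs
def stepB (out : List Int) (x : Int) : List Int :=
  if out.isEmpty || !(PySem.List.pyGet? out (-1) == some x) then out ++ [x] else out

lemma findUnion_alt_eq (arr1 arr2 : List Int) (n m : Int) :
    findUnion_alt arr1 arr2 n m =
      (PySem.List.sorted
        ((PySem.List.pyRange 0 n 1).filterMap (fun i => PySem.List.pyGet? arr1 i) ++
         (PySem.List.pyRange 0 m 1).filterMap (fun j => PySem.List.pyGet? arr2 j))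
        (fun x => x) false).foldl stepB [] := rfl

lemma le_getLast_of_pairwise {l : List Int} (hp : l.Pairwise (· ≤ ·)) {y : Int}
    (hy : y ∈ l) (hne : l ≠ []) : y ≤ l.getLast hne := by
  rcases l.eq_nil_or_concat with rfl | ⟨l', b, rfl⟩
  · simp at hy
  · simp only [List.concat_eq_append] at hne hy hp ⊢
    have hb : (l' ++ [b]).getLast hne = b := by simp
    rw [hb]
    rcases List.mem_append.1 hy with hy' | hy'
    · exact (List.pairwise_append.1 hp).2.2 y hy' b (by simp)
    · simp at hy'; omega

lemma foldB_spec : ∀ (rest out : List Int), (out ++ rest).Pairwise (· ≤ ·) → out.Nodup →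
    (rest.foldl stepB out).Pairwise (· ≤ ·) ∧ (rest.foldl stepB out).Nodup ∧
      (∀ a, a ∈ rest.foldl stepB out ↔ a ∈ out ∨ a ∈ rest) := by
  intro rest
  induction rest with
  | nil =>
    intro out hp hnd
    exact ⟨by simpa using hp, hnd, fun a => by simp⟩
  | cons x xs ih =>
    intro out hp hnd
    simp only [List.foldl_cons]
    by_cases hout : out = []
    · subst hout
      have hcond : stepB [] x = [x] := by simp [stepB]
      rw [hcond]
      obtain ⟨h1, h2, h3⟩ := ih [x] (by simpa using hp) (by simp)
      refine ⟨h1, h2, fun a => ?_⟩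
      rw [h3 a]; simp
    · by_cases hlast : out.getLast? = some x
      · have hcond : stepB out x = out := by
          simp [stepB, PySem.List.pyGet?_neg_one, hout, hlast]
        rw [hcond]
        have hsub : (out ++ xs).Sublist (out ++ x :: xs) :=
          (List.sublist_cons_self x xs).append_left out
        obtain ⟨h1, h2, h3⟩ := ih out (hp.sublist hsub) hnd
        have hxmem : x ∈ out := by
          rcases List.getLast?_eq_some_iff.1 hlast with ⟨l', rfl⟩
          simp
        refine ⟨h1, h2, fun a => ?_⟩
        rw [h3 a]
        simp only [List.mem_cons]
        constructor
        · tauto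
        · rintro (ha | rfl | ha) <;> tauto
      · have hcond : stepB out x = out ++ [x] := by
          simp [stepB, PySem.List.pyGet?_neg_one, hout, hlast]
        rw [hcond]
        have hpx : ((out ++ [x]) ++ xs).Pairwise (· ≤ ·) := by
          simpa [List.append_assoc] using hp
        have hxnot : x ∉ out := by
          intro hx
          have hb := List.getLast_mem hout
          have hble : out.getLast hout ≤ x :=
            (List.pairwise_append.1 hp).2.2 _ hb x (by simp)
          have hxle : x ≤ out.getLast hout :=
            le_getLast_of_pairwise ((List.pairwise_append.1 hp).1) hx hout
          have hbx : out.getLast hout = x := le_antisymm hble hxle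
          exact hlast (by rw [← hbx]; exact List.getLast?_eq_some_getLast hout)
        have hnd' : (out ++ [x]).Nodup := by
          simp [List.nodup_append, hnd]
          exact fun a ha hax => hxnot (hax ▸ ha)
        obtain ⟨h1, h2, h3⟩ := ih (out ++ [x]) hpx hnd'
        refine ⟨h1, h2, fun a => ?_⟩
        rw [h3 a]
        simp only [List.mem_append, List.mem_cons]
        tauto

-- ===== VERDICT (by name: the statement is the Claim_ definition above) =====
theorem findUnion_spec : Claim_equal_findUnion := by
  intro arr1 arr2 n m _hDom _hPre
  unfold Spec_findUnion
  rw [findUnion_eq, findUnion_alt_eq]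
  set S := (PySem.List.pyRange 0 (max m n) 1).foldl (stepA arr1 arr2 n m) PySem.Set.empty with hS
  set M := (PySem.List.pyRange 0 n 1).filterMap (fun i => PySem.List.pyGet? arr1 i) ++
           (PySem.List.pyRange 0 m 1).filterMap (fun j => PySem.List.pyGet? arr2 j) with hM
  -- left side facts
  have hLperm : (PySem.List.sorted S (fun x => x) false).Perm S := PySem.List.sorted_perm _ _ _
  have hLpair : (PySem.List.sorted S (fun x => x) false).Pairwise (· ≤ ·) := by
    simpa using PySem.List.sorted_pairwise S (fun x : Int => x)
  have hLnd : (PySem.List.sorted S (fun x => x) false).Nodup :=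
    hLperm.symm.nodup (nodup_foldA arr1 arr2 n m _ _ (by simp [PySem.Set.empty]))
  -- right side facts
  have hMpair : (PySem.List.sorted M (fun x => x) false).Pairwise (· ≤ ·) := by
    simpa using PySem.List.sorted_pairwise M (fun x : Int => x)
  obtain ⟨hRpair, hRnd, hRmem⟩ :=
    foldB_spec (PySem.List.sorted M (fun x => x) false) [] (by simpa using hMpair) (by simp)
  -- memberships agree
  have hmem : ∀ a, a ∈ PySem.List.sorted S (fun x => x) false ↔
      a ∈ (PySem.List.sorted M (fun x => x) false).foldl stepB [] := by
    intro a
    rw [hRmem a, PySem.List.mem_sorted, PySem.List.mem_sorted, hS, hM,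
        mem_foldA arr1 arr2 n m]
    simp only [List.mem_append, List.mem_filterMap, PySem.List.mem_pyRange_one,
      List.not_mem_nil, false_or]
    constructor
    · rintro (he | ⟨i, ⟨h0, _⟩, hn, hget⟩ | ⟨i, ⟨h0, _⟩, hm, hget⟩)
      · simp [PySem.Set.empty] at he
      · exact Or.inl ⟨i, ⟨h0, hn⟩, hget⟩
      · exact Or.inr ⟨i, ⟨h0, hm⟩, hget⟩
    · rintro (⟨i, ⟨h0, hn⟩, hget⟩ | ⟨i, ⟨h0, hm⟩, hget⟩)
      · exact Or.inr (Or.inl ⟨i, ⟨h0, by omega⟩, hn, hget⟩)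
      · exact Or.inr (Or.inr ⟨i, ⟨h0, by omega⟩, hm, hget⟩)
  -- both sorted (≤), both nodup, same members ⇒ equal
  have hperm : (PySem.List.sorted S (fun x => x) false).Perm
      ((PySem.List.sorted M (fun x => x) false).foldl stepB []) :=
    (List.perm_ext_iff_of_nodup hLnd hRnd).2 hmem
  exact PySem.List.eq_of_perm_of_pairwise_le_of_injective (fun x : Int => x)
    (fun _ _ h => h) hperm (by simpa) (by simpa)
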